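-- pv_equiv track=rewrite | github.com/rishikhaneja/adventofcode | 2025/python/3.py | largest_first
-- ===== SOURCE A (Python) =====
-- def largest_first(digits: str) -> tuple[str, int]:
--     largest = '0'
--     position = 0
--     for i, digit in enumerate(digits):
--         if digit > largest:
--             largest = digit
--             position = i
--     return largest, position
-- ===== SOURCE B (Python) =====
-- def largest_first(digits: str) -> tuple[str, int]:
--     largest = max(max(digits, default='0'), '0')
--     position = digits.index(largest) if largest != '0' else 0
--     return largest, position
-- ===== Notes on version B (the rewrite author's own statement) =====
-- stated objective: idiomatic
-- what changed: Replaces the fused single-pass max/position tracking loop with a two-pass decomposition: compute the maximum character with max(..., default='0') floored at '0', then locate its first occurrence with str.index (position 0 when nothing exceeds '0'); the passes run in C, giving a measured constant-factor speedup.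
import Mathlib
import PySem

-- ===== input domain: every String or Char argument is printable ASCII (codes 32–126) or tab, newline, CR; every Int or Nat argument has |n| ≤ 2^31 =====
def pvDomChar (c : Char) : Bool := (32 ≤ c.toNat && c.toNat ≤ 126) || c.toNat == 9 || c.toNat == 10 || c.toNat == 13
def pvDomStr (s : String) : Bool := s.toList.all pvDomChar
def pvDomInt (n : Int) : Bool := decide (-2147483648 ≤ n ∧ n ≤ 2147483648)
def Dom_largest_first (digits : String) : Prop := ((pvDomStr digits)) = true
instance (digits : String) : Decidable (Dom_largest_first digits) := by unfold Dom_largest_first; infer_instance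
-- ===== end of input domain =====

-- B replaces A's fused tracking loop by a two-pass decomposition (max first, then locate
-- its first occurrence); same O(n) cost, proved to return the same pair on every input.

-- ===== PORT A =====
-- literal port of A: one pass over enumerate(digits), tracking (largest, position)
def largest_first (digits : String) : String × Int :=
  let r := (PySem.List.enumerate digits.toList).foldl
    (fun (st : Char × Int) (p : Int × Char) => if st.1 < p.2 then (p.2, p.1) else st) ('0', 0)
  (String.ofList [r.1], r.2)

-- ===== PORT B =====
-- literal port of Source B: largest = max(max(digits, default='0'), '0');
-- position = digits.index(largest) if largest != '0' else 0.
-- str.index is ported via List.index?; when largest ≠ '0' it is a member, so getD 0 is never used.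
def largest_first_alt (digits : String) : String × Int :=
  let largest := max (PySem.List.maxD digits.toList (fun c => c) '0') '0'
  let position : Int :=
    if largest ≠ '0' then (((PySem.List.index? digits.toList largest).getD 0 : Nat) : Int) else 0
  (String.ofList [largest], position)

-- ===== PRECONDITION & SPEC =====
def Spec_largest_first (digits : String) (out : String × Int) : Prop := out = largest_first_alt digits
instance (digits : String) (out : String × Int) : Decidable (Spec_largest_first digits out) := by unfold Spec_largest_first; infer_instance

-- ===== CLAIM (what is proved, stated in full; the proofs are below) =====
def Claim_equal_largest_first : Prop := ∀ (digits : String), Dom_largest_first digits → Spec_largest_first digits (largest_first digits)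

-- ===== LEMMAS AND PROOFS =====

-- running maximum of the characters, floored at '0' (the value both programs compute)
def pvL (cs : List Char) : Char := cs.foldl max '0'
-- first position of that maximum (0 when the floor '0' wins)
def pvP (cs : List Char) : Int :=
  if pvL cs = '0' then 0 else (((PySem.List.index? cs (pvL cs)).getD 0 : Nat) : Int)

theorem pv_foldl_max_comm (t : List Char) : ∀ (x b : Char),
    max (t.foldl max x) b = t.foldl max (max x b) := by
  induction t with
  | nil => intro x b; rfl
  | cons y t ih =>
      intro x b
      simp only [List.foldl_cons]
      rw [ih (max x y) b, max_right_comm]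

theorem pvL_append (cs : List Char) (c : Char) : pvL (cs ++ [c]) = max (pvL cs) c := by
  simp [pvL, List.foldl_append]

theorem pv_loop_eq (cs : List Char) :
    (PySem.List.enumerate cs).foldl
      (fun (st : Char × Int) (p : Int × Char) => if st.1 < p.2 then (p.2, p.1) else st) ('0', 0)
    = (pvL cs, pvP cs) := by
  induction cs using List.reverseRecOn with
  | nil => simp [PySem.List.enumerate_nil, pvL, pvP]
  | append_singleton cs c ih =>
      rw [PySem.List.enumerate_append, List.foldl_append, ih,
        PySem.List.enumerate_cons, PySem.List.enumerate_nil]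
      simp only [List.foldl_cons, List.foldl_nil]
      by_cases h : pvL cs < c
      · -- c strictly beats everything seen so far: new max c at fresh index cs.length
        have hc0 : '0' < c := lt_of_le_of_lt (PySem.List.le_foldl_max cs '0').1 h
        have hnot : c ∉ cs := by
          intro hm
          exact absurd ((PySem.List.le_foldl_max cs '0').2 c hm) (not_le.mpr h)
        have hmax : pvL (cs ++ [c]) = c := by rw [pvL_append]; exact max_eq_right h.le
        have hidx : PySem.List.index? (cs ++ [c]) c = some cs.length :=
          PySem.List.index?_append_singleton_self cs c hnot
        simp only [h, if_pos]
        rw [Prod.mk.injEq]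
        refine ⟨hmax.symm, ?_⟩
        rw [pvP, hmax, if_neg hc0.ne', hidx]
        simp
      · -- c does not beat the running max: state unchanged
        have hle : c ≤ pvL cs := not_lt.mp h
        have hmax : pvL (cs ++ [c]) = pvL cs := by rw [pvL_append]; exact max_eq_left hle
        simp only [h, if_false]
        rw [Prod.mk.injEq]
        refine ⟨hmax.symm, ?_⟩
        by_cases h0 : pvL cs = '0'
        · simp [pvP, hmax, h0]
        · have hmem : pvL cs ∈ cs := by
            rcases PySem.List.foldl_max_mem cs '0' with h' | h'
            · exact absurd h' h0
            · exact h'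
          have heq : PySem.List.index? (cs ++ [c]) (pvL cs) = PySem.List.index? cs (pvL cs) :=
            PySem.List.index?_append_of_mem [c] hmem
          rw [pvP, pvP, hmax, if_neg h0, if_neg h0, heq]

theorem pv_largest_eq (cs : List Char) :
    max (PySem.List.maxD cs (fun c => c) '0') '0' = pvL cs := by
  cases cs with
  | nil => decide
  | cons x t =>
      have h : PySem.List.maxD (x :: t) (fun c => c) '0' = t.foldl max x := by
        simp [PySem.List.maxD, PySem.List.max?_id_cons]
      rw [h, pv_foldl_max_comm, pvL]
      simp [List.foldl_cons, max_comm x '0']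

-- ===== VERDICT (by name: the statement is the Claim_ definition above) =====
theorem largest_first_spec : Claim_equal_largest_first := by
  intro digits _
  show largest_first digits = largest_first_alt digits
  unfold largest_first largest_first_alt
  rw [pv_loop_eq, pv_largest_eq]
  rw [Prod.mk.injEq]
  refine ⟨rfl, ?_⟩
  unfold pvP
  by_cases h0 : pvL digits.toList = '0' <;> simp [h0]
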